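-- pv_equiv track=rewrite | github.com/david-gang/project_euler | src/ex41_60/ex50.py | get_largest_consecutive
-- ===== SOURCE A (Python) =====
-- def get_largest_consecutive(primes, prime_set,i):
--     largest_prime = (-1,0)
--     s = 0
--     prime_len = len(primes)
--     last_prime = primes[-1]
--     for j in range(i,prime_len):
--         s += primes[j]
--         if s> last_prime:
--             break
--         if s in prime_set:
--             largest_prime = (j-i+1,s)
--     return largest_prime
-- ===== SOURCE B (Python) =====
-- def get_largest_consecutive(primes, prime_set, i):
--     last_prime = primes[-1]
--     pairs = []
--     s = 0
--     for j in range(i, len(primes)):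
--         s += primes[j]
--         if s > last_prime:
--             break
--         pairs.append((j - i + 1, s))
--     for l, t in reversed(pairs):
--         if t in prime_set:
--             return (l, t)
--     return (-1, 0)
-- ===== Notes on version B (the rewrite author's own statement) =====
-- stated objective: alternative
-- what changed: A's single forward pass that overwrites the last qualifying (length,sum) pair is replaced by a prefix-collection phase (consecutive sums until they exceed primes[-1]) followed by a reversed first-match scan over the collected pairs.
import Mathlib
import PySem

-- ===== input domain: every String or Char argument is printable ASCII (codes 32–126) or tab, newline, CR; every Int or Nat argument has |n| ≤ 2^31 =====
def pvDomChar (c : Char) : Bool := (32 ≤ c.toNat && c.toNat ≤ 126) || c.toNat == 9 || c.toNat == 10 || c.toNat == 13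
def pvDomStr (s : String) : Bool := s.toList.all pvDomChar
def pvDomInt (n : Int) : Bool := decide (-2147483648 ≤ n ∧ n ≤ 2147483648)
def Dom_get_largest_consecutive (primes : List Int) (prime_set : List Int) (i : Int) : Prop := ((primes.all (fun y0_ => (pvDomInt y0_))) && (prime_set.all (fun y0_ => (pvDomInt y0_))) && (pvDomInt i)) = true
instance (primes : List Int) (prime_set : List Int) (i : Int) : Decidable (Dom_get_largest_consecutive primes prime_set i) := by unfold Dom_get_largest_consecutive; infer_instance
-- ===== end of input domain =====

-- B replaces A's single overwrite-the-last-match pass by a prefix-collection phase plus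
-- a reversed first-match scan (alternative decomposition, same cost).


-- ===== PORT A =====
-- A's for-loop with break: state (largest_prime, s), indices j from range(i, len);
-- primes[j] is in range under Pre_, so pyGetD with default 0 is exact there.
def aLoop (primes : List Int) (prime_set : List Int) (i : Int) (last_prime : Int) :
    List Int → (Int × Int) → Int → (Int × Int)
  | [], best, _ => best
  | j :: js, best, s =>
    let s' := s + PySem.List.pyGetD primes j 0
    if s' > last_prime then best
    else if prime_set.contains s' then aLoop primes prime_set i last_prime js (j - i + 1, s') s'
    else aLoop primes prime_set i last_prime js best s'

def get_largest_consecutive (primes : List Int) (prime_set : List Int) (i : Int) : Int × Int :=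
  let prime_len : Int := primes.length
  let last_prime := PySem.List.pyGetD primes (-1) 0
  aLoop primes prime_set i last_prime (PySem.List.pyRange i prime_len 1) (-1, 0) 0

-- ===== PORT B =====
-- phase 1: collect (j-i+1, running sum) pairs, stopping when the sum exceeds last_prime
def bCollect (primes : List Int) (i : Int) (last_prime : Int) :
    List Int → Int → List (Int × Int)
  | [], _ => []
  | j :: js, s =>
    let s' := s + PySem.List.pyGetD primes j 0
    if s' > last_prime then []
    else (j - i + 1, s') :: bCollect primes i last_prime js s'

-- phase 2: first pair (scanning the reversed list) whose sum is in prime_set, else (-1,0)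
def bRevScan (prime_set : List Int) : List (Int × Int) → Int × Int
  | [] => (-1, 0)
  | p :: ps => if prime_set.contains p.2 then p else bRevScan prime_set ps

def get_largest_consecutive_alt (primes : List Int) (prime_set : List Int) (i : Int) : Int × Int :=
  let last_prime := PySem.List.pyGetD primes (-1) 0
  bRevScan prime_set
    ((bCollect primes i last_prime (PySem.List.pyRange i (primes.length : Int) 1) 0).reverse)

-- ===== PRECONDITION & SPEC =====
-- Pre_ excludes exactly the inputs where Python A raises IndexError:
-- empty primes (primes[-1]) or i < -len(primes) (primes[i] out of range). B raises there too.
def Pre_get_largest_consecutive (primes : List Int) (prime_set : List Int) (i : Int) : Prop :=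
  primes ≠ [] ∧ -(primes.length : Int) ≤ i
instance (primes : List Int) (prime_set : List Int) (i : Int) : Decidable (Pre_get_largest_consecutive primes prime_set i) := by unfold Pre_get_largest_consecutive; infer_instance

def pvWitness_get_largest_consecutive : List Int × List Int × Int := ([2, 3, 5, 7], [2, 3, 5, 7, 17], 0)

def Spec_get_largest_consecutive (primes : List Int) (prime_set : List Int) (i : Int) (out : Int × Int) : Prop := out = get_largest_consecutive_alt primes prime_set i
instance (primes : List Int) (prime_set : List Int) (i : Int) (out : Int × Int) : Decidable (Spec_get_largest_consecutive primes prime_set i out) := by unfold Spec_get_largest_consecutive; infer_instance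

-- ===== CLAIM (what is proved, stated in full; the proofs are below) =====
def Claim_equal_get_largest_consecutive : Prop := ∀ (primes : List Int) (prime_set : List Int) (i : Int), Dom_get_largest_consecutive primes prime_set i → Pre_get_largest_consecutive primes prime_set i → Spec_get_largest_consecutive primes prime_set i (get_largest_consecutive primes prime_set i)

-- ===== LEMMAS AND PROOFS =====

-- reverse scan with an explicit default, used only in the proof
def revScanD (prime_set : List Int) : List (Int × Int) → (Int × Int) → Int × Int
  | [], d => d
  | p :: ps, d => if prime_set.contains p.2 then p else revScanD prime_set ps d

theorem revScanD_append_singleton (prime_set : List Int) (xs : List (Int × Int))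
    (p : Int × Int) (d : Int × Int) :
    revScanD prime_set (xs ++ [p]) d
      = revScanD prime_set xs (if prime_set.contains p.2 then p else d) := by
  induction xs with
  | nil => simp [revScanD]
  | cons q qs ih => simp [revScanD, ih]

theorem revScanD_eq_bRevScan (prime_set : List Int) (ps : List (Int × Int)) :
    revScanD prime_set ps (-1, 0) = bRevScan prime_set ps := by
  induction ps with
  | nil => rfl
  | cons q qs ih => simp [revScanD, bRevScan, ih]

theorem aLoop_eq_revScanD (primes prime_set : List Int) (i last_prime : Int)
    (js : List Int) (d : Int × Int) (s : Int) :
    aLoop primes prime_set i last_prime js d s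
      = revScanD prime_set (bCollect primes i last_prime js s).reverse d := by
  induction js generalizing d s with
  | nil => rfl
  | cons j js ih =>
    simp only [aLoop, bCollect]
    split_ifs with h1 h2
    · rfl
    · rw [ih, List.reverse_cons, revScanD_append_singleton, if_pos h2]
    · rw [ih, List.reverse_cons, revScanD_append_singleton, if_neg h2]

-- ===== VERDICT (by name: the statement is the Claim_ definition above) =====
theorem get_largest_consecutive_spec : Claim_equal_get_largest_consecutive := by
  intro primes prime_set i _ _
  unfold Spec_get_largest_consecutive get_largest_consecutive get_largest_consecutive_alt
  rw [aLoop_eq_revScanD, revScanD_eq_bRevScan]
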